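-- pv_equiv track=rewrite | github.com/fjarri/grunnur | grunnur/dtypes.py | _find_minimum_alignment
-- ===== SOURCE A (Python) =====
-- def _find_minimum_alignment(offset: int, base_alignment: int, prev_end: int) -> int:
--     """
--     Returns the minimum alignment that must be set for a field with
--     ``base_alignment`` (the one inherent to the type),
--     so that the compiler positioned it at ``offset`` given that the previous field
--     ends at the position ``prev_end``.
--     """
--     # Essentially, we need to find the minimum k such that:
--     # 1) offset = m * base_alignment * 2**k, where m > 0 and k >= 0;
--     #    (by definition of alignment)
--     # 2) offset - prev_offset < base_alignment * 2**k
--     #    (otherwise the compiler can just as well take m' = m - 1).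
--     if offset % base_alignment != 0:
--         raise ValueError(
--             f"Field offset ({offset}) must be a multiple of the base alignment ({base_alignment})."
--         )
--
--     alignment = base_alignment
--     while offset % alignment == 0:
--         if offset - prev_end < alignment:
--             return alignment
--
--         alignment *= 2
--
--     raise ValueError(
--         f"Could not find a suitable alignment for the field at offset {offset}; "
--         "consider adding explicit padding."
--     )
-- ===== SOURCE B (Python) =====
-- def _find_minimum_alignment(offset: int, base_alignment: int, prev_end: int) -> int:
--     if offset % base_alignment != 0:
--         raise ValueError(
--             f"Field offset ({offset}) must be a multiple of the base alignment ({base_alignment})."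
--         )
--     # Closed form: the smallest k >= 0 with base_alignment * 2**k > offset - prev_end.
--     k = max((offset - prev_end) // base_alignment, 0).bit_length()
--     alignment = base_alignment << k
--     if offset % alignment == 0:
--         return alignment
--     raise ValueError(
--         f"Could not find a suitable alignment for the field at offset {offset}; "
--         "consider adding explicit padding."
--     )
-- ===== Notes on version B (the rewrite author's own statement) =====
-- stated objective: simpler
-- what changed: Replaces A's doubling while-loop with a closed-form bit computation: the smallest k with base_alignment*2^k > offset-prev_end is obtained from one floor division and bit_length, followed by a single divisibility check.
-- outside the precondition, e.g. on _find_minimum_alignment(0, -1, 5): A returns -1, B returns -8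
import Mathlib
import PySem

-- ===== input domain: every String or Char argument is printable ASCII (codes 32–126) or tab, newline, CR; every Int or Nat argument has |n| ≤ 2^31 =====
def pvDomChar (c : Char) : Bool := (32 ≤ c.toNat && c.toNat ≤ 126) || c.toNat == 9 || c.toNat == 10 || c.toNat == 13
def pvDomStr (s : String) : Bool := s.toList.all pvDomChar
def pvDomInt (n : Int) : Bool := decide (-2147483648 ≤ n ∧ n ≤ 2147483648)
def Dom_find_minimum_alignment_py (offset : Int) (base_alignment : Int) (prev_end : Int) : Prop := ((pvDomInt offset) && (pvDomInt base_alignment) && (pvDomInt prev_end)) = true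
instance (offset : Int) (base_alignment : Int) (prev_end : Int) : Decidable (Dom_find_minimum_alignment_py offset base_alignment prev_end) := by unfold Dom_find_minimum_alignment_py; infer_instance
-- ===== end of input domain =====

-- B replaces A's doubling while-loop by a closed-form bit_length computation of the minimal k (objective: simpler).
-- Both Pythons raise ValueError on some inputs; the ports return 0 there and Pre_ excludes those inputs.

-- ===== PORT A =====
-- A's while-loop; fuel 64 is enough on the whole domain Dom admitted by Pre_ (inside Dom the
-- loop body runs at most 35 times; the proof derives this bound from Dom, it is not assumed);
-- on fuel exhaustion it returns the same sentinel 0 as the raise path.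
def pvLoopA (offset : Int) (prev_end : Int) (alignment : Int) : Nat → Int
  | 0 => 0
  | f + 1 =>
    if PySem.Int.mod offset alignment = 0 then
      if offset - prev_end < alignment then alignment
      else pvLoopA offset prev_end (alignment * 2) f
    else 0  -- raise ValueError("Could not find a suitable alignment …")

def find_minimum_alignment_py (offset : Int) (base_alignment : Int) (prev_end : Int) : Int :=
  if PySem.Int.mod offset base_alignment ≠ 0 then 0  -- raise ValueError("… must be a multiple …")
  else pvLoopA offset prev_end base_alignment 64

-- ===== PORT B =====
def find_minimum_alignment_py_alt (offset : Int) (base_alignment : Int) (prev_end : Int) : Int :=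
  if PySem.Int.mod offset base_alignment ≠ 0 then 0  -- raise ValueError("… must be a multiple …")
  else
    let k := PySem.Int.bitLength (max (PySem.Int.floordiv (offset - prev_end) base_alignment) 0)
    let alignment := base_alignment <<< k
    if PySem.Int.mod offset alignment = 0 then alignment
    else 0  -- raise ValueError("Could not find a suitable alignment …")

-- ===== PRECONDITION & SPEC =====
-- Pre_ restricts to positive base_alignment — the function's natural domain (an alignment is a positive
-- power of two; A's behaviour for base_alignment ≤ 0 is accidental: it raises ZeroDivisionError at 0 and
-- B does not reproduce its negative-alignment values) — and otherwise excludes EXACTLY the inputs where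
-- A raises ValueError: offset not a multiple of base_alignment, or no exponent k makes base_alignment*2^k
-- both divide offset and exceed offset-prev_end.  The bound k ≤ bit_length(offset) in the last conjunct
-- loses nothing: for offset ≠ 0, base_alignment*2^k ∣ offset forces 2^k ≤ |offset| < 2^bit_length(offset).
def Pre_find_minimum_alignment_py (offset : Int) (base_alignment : Int) (prev_end : Int) : Prop :=
  1 ≤ base_alignment ∧ PySem.Int.mod offset base_alignment = 0 ∧
    (offset = 0 ∨
      ∃ k ≤ PySem.Int.bitLength offset, PySem.Int.mod offset (base_alignment * 2 ^ k) = 0 ∧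
        offset - prev_end < base_alignment * 2 ^ k)
instance (offset : Int) (base_alignment : Int) (prev_end : Int) : Decidable (Pre_find_minimum_alignment_py offset base_alignment prev_end) := by unfold Pre_find_minimum_alignment_py; infer_instance

def pvWitness_find_minimum_alignment_py : Int × Int × Int := (8, 4, 6)

def Spec_find_minimum_alignment_py (offset : Int) (base_alignment : Int) (prev_end : Int) (out : Int) : Prop := out = find_minimum_alignment_py_alt offset base_alignment prev_end
instance (offset : Int) (base_alignment : Int) (prev_end : Int) (out : Int) : Decidable (Spec_find_minimum_alignment_py offset base_alignment prev_end out) := by unfold Spec_find_minimum_alignment_py; infer_instance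

-- ===== CLAIM (what is proved, stated in full; the proofs are below) =====
def Claim_equal_find_minimum_alignment_py : Prop := ∀ (offset : Int) (base_alignment : Int) (prev_end : Int), Dom_find_minimum_alignment_py offset base_alignment prev_end → Pre_find_minimum_alignment_py offset base_alignment prev_end → Spec_find_minimum_alignment_py offset base_alignment prev_end (find_minimum_alignment_py offset base_alignment prev_end)

-- ===== LEMMAS AND PROOFS =====

-- bit_length characterizes powers of two: n < 2^k iff bit_length n ≤ k (for n : Nat).
lemma bitLength_le_iff (n k : Nat) : PySem.Int.bitLength (n : Int) ≤ k ↔ n < 2 ^ k := by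
  constructor
  · intro h
    have h1 := PySem.Int.lt_two_pow_bitLength (n : Int)
    have : (n : Int).natAbs = n := Int.natAbs_natCast n
    calc n = (n : Int).natAbs := this.symm
      _ < 2 ^ PySem.Int.bitLength (n : Int) := h1
      _ ≤ 2 ^ k := Nat.pow_le_pow_right (by norm_num) h
  · intro h
    by_contra hlt
    rw [not_le] at hlt
    have hn0 : (n : Int) ≠ 0 := by
      intro h0
      have : n = 0 := by exact_mod_cast h0
      subst this
      simp [PySem.Int.bitLength_zero] at hlt
    have h2 := PySem.Int.two_pow_bitLength_le (n : Int) hn0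
    have hna : (n : Int).natAbs = n := Int.natAbs_natCast n
    rw [hna] at h2
    have : 2 ^ k ≤ 2 ^ (PySem.Int.bitLength (n : Int) - 1) :=
      Nat.pow_le_pow_right (by norm_num) (by omega)
    omega

-- B's k is the minimal exponent: diff < base * 2^k iff kB ≤ k.
lemma kB_min (diff base : Int) (hbpos : 0 < base) (k : Nat) :
    diff < base * 2 ^ k ↔
      PySem.Int.bitLength (max (PySem.Int.floordiv diff base) 0) ≤ k := by
  set t := PySem.Int.floordiv diff base with ht
  have h1 : diff < base * 2 ^ k ↔ t < 2 ^ k := by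
    rw [mul_comm]
    exact (PySem.Int.floordiv_lt_iff_lt_mul (a := diff) (q := 2 ^ k) hbpos).symm
  have h2 : t < 2 ^ k ↔ max t 0 < 2 ^ k := by
    rw [max_lt_iff]
    exact ⟨fun h => ⟨h, pow_pos two_pos k⟩, fun h => h.1⟩
  have hmax : (0 : Int) ≤ max t 0 := le_max_right t 0
  have hcast : ((max t 0).toNat : Int) = max t 0 := Int.toNat_of_nonneg hmax
  have h3 : max t 0 < 2 ^ k ↔ (max t 0).toNat < 2 ^ k := by
    rw [Int.toNat_lt hmax]; push_cast; rfl
  rw [h1, h2, h3, ← bitLength_le_iff, hcast]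

-- The loop invariant: starting at alignment base*2^j with enough fuel, A's loop returns base*2^kB.
lemma loopA_eq (offset base prev_end : Int) (_hb : 0 < base) (kB : Nat)
    (hdvd : base * 2 ^ kB ∣ offset)
    (hmin : ∀ i : Nat, offset - prev_end < base * 2 ^ i ↔ kB ≤ i) :
    ∀ (f j : Nat), j ≤ kB → kB < j + f →
      pvLoopA offset prev_end (base * 2 ^ j) f = base * 2 ^ kB := by
  intro f
  induction f with
  | zero => intro j hj hf; omega
  | succ f ih =>
    intro j hj hf
    have hdj : base * 2 ^ j ∣ offset :=
      dvd_trans (mul_dvd_mul_left base (pow_dvd_pow 2 hj)) hdvd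
    have hmod : PySem.Int.mod offset (base * 2 ^ j) = 0 :=
      (PySem.Int.mod_eq_zero_iff_dvd offset (base * 2 ^ j)).mpr hdj
    rw [pvLoopA, if_pos hmod]
    by_cases hlt : offset - prev_end < base * 2 ^ j
    · have : kB ≤ j := (hmin j).mp hlt
      have : j = kB := le_antisymm hj this
      rw [if_pos hlt, this]
    · have hjk : j < kB := by
        by_contra h
        exact hlt ((hmin j).mpr (by omega))
      rw [if_neg hlt]
      have harr : base * 2 ^ j * 2 = base * 2 ^ (j + 1) := by ring
      rw [harr]
      exact ih (j + 1) (by omega) (by omega)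

-- With a bounded witness exponent K < 64, the two ports agree.
lemma main_aux (offset base prev_end : Int) (hb1 : 1 ≤ base)
    (hmod0 : PySem.Int.mod offset base = 0) (K : Nat) (hK64 : K < 64)
    (hKdvd : PySem.Int.mod offset (base * 2 ^ K) = 0)
    (hKlt : offset - prev_end < base * 2 ^ K) :
    find_minimum_alignment_py offset base prev_end =
      find_minimum_alignment_py_alt offset base prev_end := by
  have hbp : 0 < base := hb1
  unfold find_minimum_alignment_py find_minimum_alignment_py_alt
  rw [if_neg (by simp [hmod0]), if_neg (by simp [hmod0])]
  set kB := PySem.Int.bitLength (max (PySem.Int.floordiv (offset - prev_end) base) 0) with hkB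
  have hmin : ∀ i : Nat, offset - prev_end < base * 2 ^ i ↔ kB ≤ i := fun i =>
    kB_min (offset - prev_end) base hbp i
  have hKB_le : kB ≤ K := (hmin K).mp hKlt
  have hdvd : base * 2 ^ kB ∣ offset := by
    have hKd : base * 2 ^ K ∣ offset :=
      (PySem.Int.mod_eq_zero_iff_dvd offset (base * 2 ^ K)).mp hKdvd
    exact dvd_trans (mul_dvd_mul_left base (pow_dvd_pow 2 hKB_le)) hKd
  have hshift : base <<< kB = base * 2 ^ kB := Int.shiftLeft_eq base kB
  have hmodB : PySem.Int.mod offset (base <<< kB) = 0 := by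
    rw [hshift]
    exact (PySem.Int.mod_eq_zero_iff_dvd offset (base * 2 ^ kB)).mpr hdvd
  simp only [hmodB, if_pos]
  have hloop : pvLoopA offset prev_end (base * 2 ^ 0) 64 = base * 2 ^ kB :=
    loopA_eq offset base prev_end hbp kB hdvd hmin 64 0 (by omega) (by omega)
  rw [show base * 2 ^ 0 = base by ring] at hloop
  rw [hloop, hshift]

-- ===== VERDICT (by name: the statement is the Claim_ definition above) =====
theorem find_minimum_alignment_py_spec : Claim_equal_find_minimum_alignment_py := by
  intro offset base prev_end hdom hpre
  obtain ⟨hb1, hmod0, hrest⟩ := hpre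
  simp only [Dom_find_minimum_alignment_py, pvDomInt, Bool.and_eq_true, decide_eq_true_eq] at hdom
  obtain ⟨⟨⟨ho1, ho2⟩, hb2⟩, ⟨hp1, hp2⟩⟩ := hdom
  unfold Spec_find_minimum_alignment_py
  by_cases h0 : offset = 0
  · -- offset = 0: every alignment divides; K = 33 works since base*2^33 > 2^31 ≥ -prev_end
    refine main_aux offset base prev_end hb1 hmod0 33 (by omega) ?_ ?_
    · rw [PySem.Int.mod_eq_zero_iff_dvd, h0]; exact dvd_zero _
    · have : (2:Int)^33 ≤ base * 2 ^ 33 := le_mul_of_one_le_left (by positivity) hb1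
      have h33 : (2:Int)^33 = 8589934592 := by norm_num
      omega
  · -- offset ≠ 0: the Pre_ witness K satisfies 2^K ≤ |offset| ≤ 2^31, hence K < 64
    rcases hrest with h | ⟨K, _, hKdvd, hKlt⟩
    · exact absurd h h0
    have hdvd : base * 2 ^ K ∣ offset := (PySem.Int.mod_eq_zero_iff_dvd _ _).mp hKdvd
    have hdvdN : (base * 2 ^ K).natAbs ∣ offset.natAbs := Int.natAbs_dvd_natAbs.mpr hdvd
    have hle : (base * 2 ^ K).natAbs ≤ offset.natAbs :=
      Nat.le_of_dvd (by simpa [Int.natAbs_pos] using h0) hdvdN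
    have habs : (base * 2 ^ K).natAbs = base.natAbs * 2 ^ K := by
      simp [Int.natAbs_mul, Int.natAbs_pow]
    have h2K : 2 ^ K ≤ offset.natAbs := by
      have hb : 1 ≤ base.natAbs := by
        have : (0:Int) < base := hb1; omega
      calc 2 ^ K ≤ base.natAbs * 2 ^ K := Nat.le_mul_of_pos_left _ (by omega)
        _ = (base * 2 ^ K).natAbs := habs.symm
        _ ≤ offset.natAbs := hle
    have hoff : offset.natAbs ≤ 2 ^ 31 := by
      have : (2:Int)^31 = 2147483648 := by norm_num
      omega
    have hK64 : K < 64 := by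
      by_contra h
      have : 2 ^ 64 ≤ 2 ^ K := Nat.pow_le_pow_right (by norm_num) (by omega)
      have h64 : (2:Nat)^64 > 2^31 := by norm_num
      omega
    exact main_aux offset base prev_end hb1 hmod0 K hK64 hKdvd hKlt
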